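-- pv_equiv track=rewrite | github.com/JeanFurman/advent-of-code | day12/main.py | possible_combinations
-- ===== SOURCE A (Python) =====
-- from itertools import product
--
-- def possible_combinations(spring):
--     possibilities = ['.' , '#']
--     unknowns = [i for i, char in enumerate(spring) if char == '?']
--     combinations = []
--
--     for combination in product(possibilities, repeat=len(unknowns)):
--         new_combination = list(spring)
--         for i, u in zip(unknowns, combination):
--             new_combination[i] = u
--         combinations.append(''.join(new_combination))
--
--     return combinations
-- ===== SOURCE B (Python) =====
-- def possible_combinations(spring):
--     prefixes = ['']
--     for c in spring:
--         if c == '?':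
--             prefixes = [p + x for p in prefixes for x in '.#']
--         else:
--             prefixes = [p + c for p in prefixes]
--     return prefixes
-- ===== Notes on version B (the rewrite author's own statement) =====
-- stated objective: alternative
-- what changed: Replaced the index-list + itertools.product + copy-and-substitute scheme by a single left-to-right pass that expands a list of prefixes, branching '.' then '#' at each '?'.
import Mathlib
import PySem

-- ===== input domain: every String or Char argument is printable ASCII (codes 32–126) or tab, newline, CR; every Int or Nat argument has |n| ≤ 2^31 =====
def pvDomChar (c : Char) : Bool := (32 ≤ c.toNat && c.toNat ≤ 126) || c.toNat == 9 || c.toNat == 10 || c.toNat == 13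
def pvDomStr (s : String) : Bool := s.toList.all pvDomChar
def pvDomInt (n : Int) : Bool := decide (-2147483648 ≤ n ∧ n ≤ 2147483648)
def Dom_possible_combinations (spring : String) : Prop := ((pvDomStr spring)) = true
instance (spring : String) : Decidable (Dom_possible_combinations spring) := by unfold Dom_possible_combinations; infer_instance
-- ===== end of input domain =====

-- B replaces A's index-list + product + copy-substitute scheme by one recursive
-- prefix-building scan (alternative decomposition, same asymptotic cost).


-- ===== PORT A =====
-- itertools.product(p, repeat=n), exact: last position varies fastest.
def pyProduct (p : List Char) : Nat → List (List Char)
  | 0 => [[]]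
  | n + 1 => p.flatMap (fun x => (pyProduct p n).map (fun rest => x :: rest))

def possible_combinations (spring : String) : List String :=
  let possibilities : List Char := ['.', '#']
  let unknowns : List Int :=
    (PySem.List.enumerate spring.toList 0).filterMap
      (fun ic => if ic.2 = '?' then some ic.1 else none)
  let combinations : List String := []
  (pyProduct possibilities unknowns.length).foldl
    (fun acc combination =>
      let new_combination :=
        (unknowns.zip combination).foldl
          (fun l iu => PySem.List.pySetD l iu.1 iu.2) spring.toList
      acc ++ [String.ofList new_combination])
    combinations

-- ===== PORT B =====
def possible_combinations_alt (spring : String) : List String :=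
  spring.toList.foldl
    (fun prefixes c =>
      if c = '?' then prefixes.flatMap (fun p => [p.push '.', p.push '#'])
      else prefixes.map (fun p => p.push c))
    [""]

-- ===== PRECONDITION & SPEC =====
def Spec_possible_combinations (spring : String) (out : List String) : Prop := out = possible_combinations_alt spring
instance (spring : String) (out : List String) : Decidable (Spec_possible_combinations spring out) := by unfold Spec_possible_combinations; infer_instance

-- ===== CLAIM (what is proved, stated in full; the proofs are below) =====
def Claim_equal_possible_combinations : Prop := ∀ (spring : String), Dom_possible_combinations spring → Spec_possible_combinations spring (possible_combinations spring)

-- ===== LEMMAS AND PROOFS =====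

-- '?'-filling: replace the '?'s of s left-to-right by the chars of comb.
def subst : List Char → List Char → List Char
  | [], _ => []
  | c :: cs, us =>
      if c = '?' then
        match us with
        | u :: us' => u :: subst cs us'
        | [] => '?' :: subst cs []
      else c :: subst cs us

-- positions of '?' in s, as Nat, starting at offset n
def idxs : List Char → Nat → List Nat
  | [], _ => []
  | c :: cs, n => if c = '?' then n :: idxs cs (n + 1) else idxs cs (n + 1)

def numQ (s : List Char) : Nat := (idxs s 0).length

theorem subst_nil : ∀ s : List Char, subst s [] = s := by
  intro s; induction s with
  | nil => rfl
  | cons c cs ih => by_cases h : c = '?' <;> simp [subst, h, ih]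

theorem idxs_length : ∀ (s : List Char) (n m : Nat),
    (idxs s n).length = (idxs s m).length := by
  intro s
  induction s with
  | nil => intro n m; rfl
  | cons c cs ih =>
    intro n m
    by_cases h : c = '?' <;> simp [idxs, h, ih (n+1) (m+1)]

theorem unknowns_eq_idxs : ∀ (s : List Char) (n : Nat),
    (PySem.List.enumerate s (Int.ofNat n)).filterMap
      (fun ic => if ic.2 = '?' then some ic.1 else none)
      = (idxs s n).map Int.ofNat := by
  intro s
  induction s with
  | nil => intro n; simp [PySem.List.enumerate_nil, idxs]
  | cons c cs ih =>
    intro n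
    have hcast : (Int.ofNat n + 1) = Int.ofNat (n + 1) := by simp
    rw [PySem.List.enumerate_cons, List.filterMap_cons, hcast, ih (n + 1)]
    by_cases h : c = '?' <;> simp [idxs, h]

theorem set_append : ∀ (pre : List Char) (c u : Char) (cs : List Char),
    (pre ++ c :: cs).set pre.length u = pre ++ u :: cs := by
  intro pre
  induction pre with
  | nil => intros; rfl
  | cons p ps ih => intro c u cs; simp [ih c u cs]

-- A's inner substitution loop computes `subst`.
theorem foldl_set_eq_subst : ∀ (s pre comb : List Char),
    ((((idxs s pre.length).map Int.ofNat).zip comb).foldl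
      (fun l iu => PySem.List.pySetD l iu.1 iu.2) (pre ++ s))
      = pre ++ subst s comb := by
  intro s
  induction s with
  | nil => intro pre comb; simp [idxs, subst]
  | cons c cs ih =>
    intro pre comb
    by_cases h : c = '?'
    · subst h
      cases comb with
      | nil => simp [idxs, subst, subst_nil]
      | cons u us =>
        rw [show idxs ('?' :: cs) pre.length = pre.length :: idxs cs (pre.length + 1) from by
              simp [idxs]]
        rw [List.map_cons, List.zip_cons_cons, List.foldl_cons]
        simp only [Int.ofNat_eq_natCast, PySem.List.pySetD_natCast]
        rw [set_append pre '?' u cs]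
        rw [show (pre ++ u :: cs) = (pre ++ [u]) ++ cs from by simp,
            show pre.length + 1 = (pre ++ [u]).length from by simp,
            ih (pre ++ [u]) us]
        simp [subst]
    · rw [show idxs (c :: cs) pre.length = idxs cs (pre.length + 1) from by simp [idxs, h]]
      rw [show (pre ++ c :: cs) = (pre ++ [c]) ++ cs from by simp,
          show pre.length + 1 = (pre ++ [c]).length from by simp,
          ih (pre ++ [c]) comb]
      simp [subst, h]

-- accumulator-append foldl is a map
theorem foldl_app_map {α β : Type} : ∀ (l : List α) (acc : List β) (f : α → β),
    l.foldl (fun a x => a ++ [f x]) acc = acc ++ l.map f := by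
  intro l
  induction l with
  | nil => intro acc f; simp
  | cons x xs ih => intro acc f; simp [List.foldl_cons, ih]

-- B's prefix-expansion loop computes a flatMap over pyProduct.
theorem foldB_eq : ∀ (s : List Char) (ps : List String),
    s.foldl
      (fun prefixes c =>
        if c = '?' then prefixes.flatMap (fun p => [p.push '.', p.push '#'])
        else prefixes.map (fun p => p.push c)) ps
      = ps.flatMap (fun p =>
          (pyProduct ['.', '#'] (numQ s)).map
            (fun comb => String.ofList (p.toList ++ subst s comb))) := by
  intro s
  induction s with
  | nil =>
    intro ps
    simp [numQ, idxs, pyProduct, subst]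
  | cons c cs ih =>
    intro ps
    by_cases h : c = '?'
    · subst h
      have hk : numQ ('?' :: cs) = numQ cs + 1 := by
        simp [numQ, idxs, idxs_length cs 1 0]
      rw [List.foldl_cons, if_pos rfl, ih, List.flatMap_assoc, hk]
      apply List.flatMap_congr
      intro p _
      rw [show pyProduct ['.', '#'] (numQ cs + 1)
            = (pyProduct ['.', '#'] (numQ cs)).map (fun r => '.' :: r)
              ++ (pyProduct ['.', '#'] (numQ cs)).map (fun r => '#' :: r) from by
            simp [pyProduct]]
      simp only [List.map_append, List.map_map, Function.comp_def, subst, reduceIte,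
        List.flatMap_cons, List.flatMap_nil, List.append_nil,
        String.toList_push, List.append_assoc, List.cons_append, List.nil_append]
    · have hk : numQ (c :: cs) = numQ cs := by
        simp [numQ, idxs, h, idxs_length cs 1 0]
      rw [List.foldl_cons, if_neg h, ih, List.flatMap_map, hk]
      apply List.flatMap_congr
      intro p _
      simp only [subst, if_neg h,
        String.toList_push, List.append_assoc, List.cons_append, List.nil_append]

-- ===== VERDICT (by name: the statement is the Claim_ definition above) =====
theorem possible_combinations_spec : Claim_equal_possible_combinations := by
  intro spring _
  unfold Spec_possible_combinations possible_combinations possible_combinations_alt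
  rw [foldB_eq spring.toList [""]]
  have hu := unknowns_eq_idxs spring.toList 0
  rw [show Int.ofNat 0 = (0 : Int) from rfl] at hu
  simp only [hu, List.length_map, foldl_app_map, List.nil_append, numQ,
    List.flatMap_cons, List.flatMap_nil, List.append_nil]
  apply List.map_congr_left
  intro comb _
  have h := foldl_set_eq_subst spring.toList [] comb
  simp only [List.nil_append, List.length_nil] at h
  rw [h]
  simp
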